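-- pv_equiv track=rewrite | github.com/Jasmineprogrammiert/DSA | C27_Two_Pointers/P27.2.py | smaller_prefixes
-- ===== SOURCE A (Python) =====
-- def smaller_prefixes(arr):
--     n = len(arr)
--     prefix = [0] * (n + 1) # sum of all length from 0 to n
--     max_k = n // 2
--
--     for i in range(n):
--         prefix[i + 1] = prefix[i] + arr[i]
--
--     for k in range (1, max_k + 1):
--         sum_k = prefix[k]
--         sum_2k = prefix[2 * k]
--
--         if sum_k > sum_2k:
--             return False
--
--     return True
-- ===== SOURCE B (Python) =====
-- def smaller_prefixes(arr):
--     sum_k = 0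
--     sum_2k = 0
--     for k in range(1, len(arr) // 2 + 1):
--         sum_k += arr[k - 1]
--         sum_2k += arr[2 * k - 2] + arr[2 * k - 1]
--         if sum_k > sum_2k:
--             return False
--     return True
-- ===== Notes on version B (the rewrite author's own statement) =====
-- stated objective: simpler
-- what changed: Replaces the O(n)-space prefix-sum table plus a separate scan with a single fused loop over k that maintains two running sums (prefix of length k and of length 2k) in O(1) extra space.
import Mathlib
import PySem

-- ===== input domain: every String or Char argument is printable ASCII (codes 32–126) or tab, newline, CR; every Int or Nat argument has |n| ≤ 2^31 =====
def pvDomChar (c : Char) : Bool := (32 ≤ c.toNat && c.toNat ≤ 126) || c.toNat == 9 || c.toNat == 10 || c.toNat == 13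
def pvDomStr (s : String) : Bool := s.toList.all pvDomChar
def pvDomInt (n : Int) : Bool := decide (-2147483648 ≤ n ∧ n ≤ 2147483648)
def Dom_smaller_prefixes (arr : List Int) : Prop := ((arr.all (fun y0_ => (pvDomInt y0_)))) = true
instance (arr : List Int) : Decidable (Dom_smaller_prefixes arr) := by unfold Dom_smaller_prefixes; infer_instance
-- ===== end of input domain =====

-- B replaces A's O(n)-space prefix-sum table plus separate scan with one fused loop
-- carrying two running sums in O(1) extra space (objective: simpler).

-- ===== PORT A =====
-- A's second loop: 'for k in range(1, max_k+1): … if sum_k > sum_2k: return False', early exit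
def pvCheckA (prefix_ : List Int) : List Nat → Bool
  | [] => true
  | k :: rest =>
    let sum_k := prefix_.getD k 0
    let sum_2k := prefix_.getD (2 * k) 0
    if sum_k > sum_2k then false else pvCheckA prefix_ rest

def smaller_prefixes (arr : List Int) : Bool :=
  let n := arr.length
  -- prefix = [0]*(n+1); for i in range(n): prefix[i+1] = prefix[i] + arr[i]
  let prefix_ := (List.range n).foldl
    (fun p i => p.set (i + 1) (p.getD i 0 + arr.getD i 0))
    (List.replicate (n + 1) (0 : Int))
  pvCheckA prefix_ (List.range' 1 (n / 2))

-- ===== PORT B =====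
-- B's loop: 'for k in range(1, len(arr)//2+1)' with running sums sum_k, sum_2k, early exit
def pvLoopB (arr : List Int) : List Nat → Int → Int → Bool
  | [], _, _ => true
  | k :: rest, sum_k, sum_2k =>
    let sum_k' := sum_k + arr.getD (k - 1) 0
    let sum_2k' := sum_2k + (arr.getD (2 * k - 2) 0 + arr.getD (2 * k - 1) 0)
    if sum_k' > sum_2k' then false else pvLoopB arr rest sum_k' sum_2k'

def smaller_prefixes_alt (arr : List Int) : Bool :=
  pvLoopB arr (List.range' 1 (arr.length / 2)) 0 0

-- ===== PRECONDITION & SPEC =====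
def Spec_smaller_prefixes (arr : List Int) (out : Bool) : Prop := out = smaller_prefixes_alt arr
instance (arr : List Int) (out : Bool) : Decidable (Spec_smaller_prefixes arr out) := by unfold Spec_smaller_prefixes; infer_instance

-- ===== CLAIM (what is proved, stated in full; the proofs are below) =====
def Claim_equal_smaller_prefixes : Prop := ∀ (arr : List Int), Dom_smaller_prefixes arr → Spec_smaller_prefixes arr (smaller_prefixes arr)

-- ===== LEMMAS AND PROOFS =====

theorem pv_sum_take_succ (arr : List Int) (m : Nat) :
    (arr.take (m + 1)).sum = (arr.take m).sum + arr.getD m 0 := by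
  rw [List.take_add_one, List.sum_append, List.getD]
  cases h : arr[m]? <;> simp

theorem pv_getD_set_self (p : List Int) (i : Nat) (v : Int) (h : i < p.length) :
    (p.set i v).getD i 0 = v := by
  simp [List.getD, h]

theorem pv_getD_set_ne (p : List Int) (i j : Nat) (v : Int) (h : i ≠ j) :
    (p.set i v).getD j 0 = p.getD j 0 := by
  simp [List.getD, h]

-- invariant of A's prefix-building fold
theorem pv_build_getD (arr : List Int) :
    ∀ (m a : Nat) (p : List Int), p.length = arr.length + 1 →
      (∀ i, i ≤ a → p.getD i 0 = (arr.take i).sum) → a + m ≤ arr.length →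
      ∀ k, k ≤ a + m →
        ((List.range' a m).foldl
          (fun p i => p.set (i + 1) (p.getD i 0 + arr.getD i 0)) p).getD k 0
          = (arr.take k).sum := by
  intro m
  induction m with
  | zero => intro a p _ hp _ k hk; simpa using hp k (by omega)
  | succ m ih =>
    intro a p hlen hp hle k hk
    rw [List.range'_succ, List.foldl_cons]
    have hval : (p.set (a + 1) (p.getD a 0 + arr.getD a 0)).length = arr.length + 1 := by
      simpa using hlen
    apply ih (a + 1) _ hval _ (by omega) k (by omega)
    intro i hi
    by_cases hia : i = a + 1
    · subst hia
      rw [pv_getD_set_self _ _ _ (by omega), hp a (le_refl a), ← pv_sum_take_succ]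
    · rw [pv_getD_set_ne _ _ _ _ (by omega)]
      exact hp i (by omega)

-- A's check loop over the prefix table equals B's fused running-sum loop
theorem pv_loops_eq (arr : List Int) (P : List Int)
    (hP : ∀ k, k ≤ arr.length → P.getD k 0 = (arr.take k).sum) :
    ∀ (m a : Nat), 1 ≤ a → a + m ≤ arr.length / 2 + 1 →
      pvCheckA P (List.range' a m)
        = pvLoopB arr (List.range' a m) ((arr.take (a - 1)).sum) ((arr.take (2 * a - 2)).sum) := by
  intro m
  induction m with
  | zero => intro a _ _; simp [pvCheckA, pvLoopB]
  | succ m ih =>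
    intro a ha hle
    rw [List.range'_succ]
    have h2a : 2 * a ≤ arr.length := by
      have := Nat.div_mul_le_self arr.length 2
      omega
    have hsk : (arr.take (a - 1)).sum + arr.getD (a - 1) 0 = (arr.take a).sum := by
      have := pv_sum_take_succ arr (a - 1)
      have hrw : a - 1 + 1 = a := by omega
      rw [hrw] at this; omega
    have hs2k : (arr.take (2 * a - 2)).sum + (arr.getD (2 * a - 2) 0 + arr.getD (2 * a - 1) 0)
        = (arr.take (2 * a)).sum := by
      have h1 := pv_sum_take_succ arr (2 * a - 2)
      have h2 := pv_sum_take_succ arr (2 * a - 1)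
      have e1 : 2 * a - 2 + 1 = 2 * a - 1 := by omega
      have e2 : 2 * a - 1 + 1 = 2 * a := by omega
      rw [e1] at h1; rw [e2] at h2; omega
    show pvCheckA P (a :: List.range' (a + 1) m)
        = pvLoopB arr (a :: List.range' (a + 1) m) _ _
    simp only [pvCheckA, pvLoopB, hsk, hs2k,
      hP a (by omega), hP (2 * a) h2a]
    by_cases hgt : (arr.take a).sum > (arr.take (2 * a)).sum
    · simp [hgt]
    · simp only [if_neg hgt]
      have := ih (a + 1) (by omega) (by omega)
      have e3 : a + 1 - 1 = a := by omega
      have e4 : 2 * (a + 1) - 2 = 2 * a := by omega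
      rw [e3, e4] at this
      exact this

-- ===== VERDICT (by name: the statement is the Claim_ definition above) =====
theorem smaller_prefixes_spec : Claim_equal_smaller_prefixes := by
  intro arr _
  show smaller_prefixes arr = smaller_prefixes_alt arr
  simp only [smaller_prefixes, smaller_prefixes_alt, List.range_eq_range']
  have hbuild := pv_build_getD arr arr.length 0
    (List.replicate (arr.length + 1) (0 : Int))
    (by simp)
    (by intro i hi; interval_cases i; simp [List.getD])
    (by omega)
  simp only [Nat.zero_add] at hbuild
  have := pv_loops_eq arr _ hbuild (arr.length / 2) 1 (le_refl 1) (by omega)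
  simpa using this
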